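-- pv_equiv track=rewrite | github.com/chiaseeeeeds/tcglistingbot-telegram | scripts/import_pokemon_jp_official.py | dedupe_card_rows
-- ===== SOURCE A (Python) =====
-- from typing import Any
--
-- def dedupe_card_rows(rows: list[dict[str, Any]]) -> list[dict[str, Any]]:
--     deduped: dict[tuple[str, str, str, str], dict[str, Any]] = {}
--     for row in rows:
--         key = (
--             str(row.get('game') or ''),
--             str(row.get('set_code') or ''),
--             str(row.get('card_number') or ''),
--             str(row.get('variant') or ''),
--         )
--         existing = deduped.get(key)
--         if existing is None:
--             deduped[key] = row
--             continue
--         existing_name = str(existing.get('card_name_jp') or existing.get('card_name_en') or '')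
--         candidate_name = str(row.get('card_name_jp') or row.get('card_name_en') or '')
--         if len(candidate_name) > len(existing_name):
--             deduped[key] = row
--     return list(deduped.values())
-- ===== SOURCE B (Python) =====
-- def dedupe_card_rows(rows: list[dict[str, object]]) -> list[dict[str, object]]:
--     groups: dict[tuple[str, str, str, str], list[dict[str, object]]] = {}
--     for row in rows:
--         key = (
--             str(row.get('game') or ''),
--             str(row.get('set_code') or ''),
--             str(row.get('card_number') or ''),
--             str(row.get('variant') or ''),
--         )
--         groups.setdefault(key, []).append(row)
--     return [
--         max(group, key=lambda r: len(str(r.get('card_name_jp') or r.get('card_name_en') or '')))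
--         for group in groups.values()
--     ]
-- ===== Notes on version B (the rewrite author's own statement) =====
-- stated objective: alternative
-- what changed: Replaces the running-best dict update (compare-and-overwrite inline during one pass) with a group-then-reduce: one pass builds an index from key to the list of its rows via setdefault, then a second pass picks each group's first longest-named row with max(key=len(name)).
import Mathlib
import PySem

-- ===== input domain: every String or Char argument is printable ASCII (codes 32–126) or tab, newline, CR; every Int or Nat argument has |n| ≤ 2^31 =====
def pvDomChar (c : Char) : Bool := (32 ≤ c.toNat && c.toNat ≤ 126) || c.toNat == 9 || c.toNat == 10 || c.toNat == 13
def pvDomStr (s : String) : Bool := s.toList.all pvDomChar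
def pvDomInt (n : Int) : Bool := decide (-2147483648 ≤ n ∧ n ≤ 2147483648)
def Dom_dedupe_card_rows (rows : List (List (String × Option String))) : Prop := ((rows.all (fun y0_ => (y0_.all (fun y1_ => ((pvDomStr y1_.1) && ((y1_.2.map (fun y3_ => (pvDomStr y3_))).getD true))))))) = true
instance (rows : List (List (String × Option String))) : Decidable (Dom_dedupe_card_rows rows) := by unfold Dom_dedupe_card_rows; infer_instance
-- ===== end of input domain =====

-- B replaces A's inline compare-and-overwrite running best by a group-by-key index
-- followed by max(group, key=len(name)) per group (objective: alternative decomposition).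

-- ===== PORT A =====
-- row.get(k)  (dict as association list, first match)
def pvGet (row : List (String × Option String)) (k : String) : Option (Option String) :=
  (PySem.Dict.mk row).get? k

-- str(row.get(k) or ''):  missing key, None and '' all give ''
def pvOrEmpty (o : Option (Option String)) : String :=
  match o with
  | some (some s) => s
  | _ => ""

-- the 4-tuple key of a row
def pvKey (row : List (String × Option String)) : String × String × String × String :=
  (pvOrEmpty (pvGet row "game"), pvOrEmpty (pvGet row "set_code"),
   pvOrEmpty (pvGet row "card_number"), pvOrEmpty (pvGet row "variant"))

-- Python truthiness of row.get(k): a non-empty string, else None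
def pvTruthy (o : Option (Option String)) : Option String :=
  match o with
  | some (some s) => if s.toList.isEmpty then none else some s
  | _ => none

-- str(row.get('card_name_jp') or row.get('card_name_en') or '')
def pvName (row : List (String × Option String)) : String :=
  ((pvTruthy (pvGet row "card_name_jp")).or (pvTruthy (pvGet row "card_name_en"))).getD ""

-- the body of A's loop
def pvStepA (d : PySem.Dict (String × String × String × String) (List (String × Option String)))
    (row : List (String × Option String)) :
    PySem.Dict (String × String × String × String) (List (String × Option String)) :=
  let key := pvKey row
  match d.get? key with
  | none => d.insert key row
  | some existing =>
      if PySem.Str.len (pvName row) > PySem.Str.len (pvName existing) then d.insert key row else d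

def dedupe_card_rows (rows : List (List (String × Option String))) : List (List (String × Option String)) :=
  (rows.foldl pvStepA PySem.Dict.empty).values

-- ===== PORT B =====
-- the body of B's grouping loop: groups.setdefault(key, []).append(row)
def pvStepB (g : PySem.Dict (String × String × String × String) (List (List (String × Option String))))
    (row : List (String × Option String)) :
    PySem.Dict (String × String × String × String) (List (List (String × Option String))) :=
  g.modify (pvKey row) [] (· ++ [row])

def dedupe_card_rows_alt (rows : List (List (String × Option String))) : List (List (String × Option String)) :=
  let groups := rows.foldl pvStepB PySem.Dict.empty
  groups.values.map (fun group =>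
    match PySem.List.max? group (fun r => PySem.Str.len (pvName r)) with
    | some m => m
    | none => [])   -- unreachable: every group is non-empty

-- ===== PRECONDITION & SPEC =====
def Spec_dedupe_card_rows (rows : List (List (String × Option String))) (out : List (List (String × Option String))) : Prop := out = dedupe_card_rows_alt rows
instance (rows : List (List (String × Option String))) (out : List (List (String × Option String))) : Decidable (Spec_dedupe_card_rows rows out) := by unfold Spec_dedupe_card_rows; infer_instance

-- ===== CLAIM (what is proved, stated in full; the proofs are below) =====
def Claim_equal_dedupe_card_rows : Prop := ∀ (rows : List (List (String × Option String))), Dom_dedupe_card_rows rows → Spec_dedupe_card_rows rows (dedupe_card_rows rows)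

-- ===== LEMMAS AND PROOFS =====

-- A's lookup at k evolves exactly like the running max (ties keep the earlier row)
-- over the rows whose key is k
theorem pvA_get (rows : List (List (String × Option String)))
    (d : PySem.Dict (String × String × String × String) (List (String × Option String)))
    (k : String × String × String × String) :
    (rows.foldl pvStepA d).get? k =
      (rows.filter (fun r => pvKey r == k)).foldl
        (fun acc x =>
          match acc with
          | none => some x
          | some m => if PySem.Str.len (pvName m) < PySem.Str.len (pvName x) then some x else some m)
        (d.get? k) := by
  induction rows generalizing d with
  | nil => simp
  | cons r rs ih =>
    by_cases hk : pvKey r = k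
    · subst hk
      rw [List.foldl_cons, ih, List.filter_cons_of_pos (by simp), List.foldl_cons]
      congr 1
      simp only [pvStepA]
      cases h : d.get? (pvKey r) with
      | none => simp [PySem.Dict.get?_insert_self]
      | some e =>
        by_cases hlt : PySem.Str.len (pvName e) < PySem.Str.len (pvName r)
        · simp only [gt_iff_lt, if_pos hlt, PySem.Dict.get?_insert_self]
        · simp only [gt_iff_lt, if_neg hlt]
          exact h
    · rw [List.foldl_cons, ih, List.filter_cons_of_neg (by simp [hk])]
      congr 1
      simp only [pvStepA]
      cases h : d.get? (pvKey r) with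
      | none => exact PySem.Dict.get?_insert_of_ne d r (Ne.symm hk)
      | some e =>
        by_cases hlt : PySem.Str.len (pvName e) < PySem.Str.len (pvName r)
        · simp only [gt_iff_lt, if_pos hlt]
          exact PySem.Dict.get?_insert_of_ne d r (Ne.symm hk)
        · simp only [gt_iff_lt, if_neg hlt]

-- A's loop and B's grouping loop touch exactly the same keys in the same order
theorem pvA_keys (rows : List (List (String × Option String)))
    (d : PySem.Dict (String × String × String × String) (List (String × Option String)))
    (g : PySem.Dict (String × String × String × String) (List (List (String × Option String))))
    (hkeys : d.keys = g.keys) :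
    (rows.foldl pvStepA d).keys = (rows.foldl pvStepB g).keys := by
  induction rows generalizing d g with
  | nil => simpa using hkeys
  | cons r rs ih =>
    simp only [List.foldl_cons]
    apply ih
    have hc : d.contains (pvKey r) = g.contains (pvKey r) := by
      rw [Bool.eq_iff_iff, PySem.Dict.contains_iff_mem_keys, PySem.Dict.contains_iff_mem_keys, hkeys]
    simp only [pvStepA, pvStepB, PySem.Dict.modify]
    cases hd : d.get? (pvKey r) with
    | none =>
      have hcd : d.contains (pvKey r) = false := by
        rw [PySem.Dict.contains_eq_isSome_get?, hd]; rfl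
      simp only [PySem.Dict.keys_insert_of_not_contains d r hcd,
        PySem.Dict.keys_insert_of_not_contains g (g.getD (pvKey r) [] ++ [r]) (hc ▸ hcd), hkeys]
    | some e =>
      have hcd : d.contains (pvKey r) = true := by
        rw [PySem.Dict.contains_eq_isSome_get?, hd]; rfl
      rw [PySem.Dict.keys_insert_of_contains g _ (hc ▸ hcd)]
      by_cases hlt : PySem.Str.len (pvName e) < PySem.Str.len (pvName r)
      · simp only [gt_iff_lt, if_pos hlt, PySem.Dict.keys_insert_of_contains d r hcd]
        exact hkeys
      · simp only [gt_iff_lt, if_neg hlt]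
        exact hkeys

-- B's group at k is exactly the rows whose key is k, in order
theorem pvB_getD (rows : List (List (String × Option String)))
    (k : String × String × String × String) :
    (rows.foldl pvStepB PySem.Dict.empty).getD k [] = rows.filter (fun r => pvKey r == k) := by
  have hmap : rows.foldl pvStepB PySem.Dict.empty
      = (rows.map (fun r => (pvKey r, r))).foldl (fun d p => d.modify p.1 [] (· ++ [p.2])) PySem.Dict.empty := by
    rw [List.foldl_map]; rfl
  rw [hmap, PySem.Dict.getD_foldl_modify_append]
  simp [List.filter_map, Function.comp_def, List.map_map]

-- ===== VERDICT (by name: the statement is the Claim_ definition above) =====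
theorem dedupe_card_rows_spec : Claim_equal_dedupe_card_rows := by
  intro rows _
  simp only [Spec_dedupe_card_rows, dedupe_card_rows, dedupe_card_rows_alt]
  have hnodB : (rows.foldl pvStepB PySem.Dict.empty).keys.Nodup :=
    PySem.Dict.nodup_keys_foldl_modify_key rows pvKey [] (fun _ x l => l ++ [x])
      PySem.Dict.empty (by simp)
  have hkeys : (rows.foldl pvStepA PySem.Dict.empty).keys = (rows.foldl pvStepB PySem.Dict.empty).keys :=
    pvA_keys rows _ _ (by simp)
  have hnodA : (rows.foldl pvStepA PySem.Dict.empty).keys.Nodup := hkeys ▸ hnodB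
  rw [PySem.Dict.values_eq_map_keys _ hnodA ([] : List (String × Option String)),
      PySem.Dict.values_eq_map_keys _ hnodB ([] : List (List (String × Option String))),
      List.map_map, hkeys]
  apply List.map_congr_left
  intro k _
  have hmax : ∀ (l : List (List (String × Option String))),
      l.foldl
        (fun acc x =>
          match acc with
          | none => some x
          | some m => if PySem.Str.len (pvName m) < PySem.Str.len (pvName x) then some x else some m)
        none
      = PySem.List.max? l (fun r => PySem.Str.len (pvName r)) := by
    intro l
    simp only [PySem.List.max?]
    apply List.foldl_ext
    intro a x _
    cases a <;> rfl
  rw [PySem.Dict.getD_eq_get?_getD, pvA_get rows PySem.Dict.empty k, PySem.Dict.get?_empty]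
  simp only [Function.comp_apply, pvB_getD rows k]
  rw [hmax (rows.filter (fun r => pvKey r == k))]
  cases PySem.List.max? (rows.filter (fun r => pvKey r == k)) (fun r => PySem.Str.len (pvName r)) <;> rfl
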